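-- pv_equiv track=rewrite | github.com/irwankusuma/nowafplsV2 | nowafplsV2.py | _rfind_sequence
-- ===== SOURCE A (Python) =====
-- def _rfind_sequence(data, seq, start):
--     data_len = len(data)
--     seq_len = len(seq)
--     if seq_len == 0 or data_len < seq_len:
--         return -1
--     i = data_len - seq_len
--     if i < start:
--         return -1
--     while i >= start:
--         match = True
--         for j in range(seq_len):
--             if (data[i + j] & 0xFF) != seq[j]:
--                 match = False
--                 break
--         if match:
--             return i
--         i -= 1
--     return -1
-- ===== SOURCE B (Python) =====
-- def _rfind_sequence(data, seq, start):
--     m = len(seq)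
--     n = len(data)
--     if m == 0 or n < m:
--         return -1
--     if any(not (0 <= x <= 255) for x in seq):
--         return -1  # a masked byte can never equal such a value
--     masked = bytes(x & 0xFF for x in data)
--     return masked.rfind(bytes(seq), max(start, 0))
-- ===== Notes on version B (the rewrite author's own statement) =====
-- stated objective: alternative
-- what changed: B replaces A's hand-written shift-and-compare double loop by masking the data once into a bytes object and delegating the search to bytes.rfind, rejecting up-front any needle value that can never be a masked byte; it trades an O(n) masking pass for the removal of per-position inner scans.
-- intended difference: When start is negative and the masked seq occurs nowhere at positions -1..n-m but does occur at some wrapped position in [max(start,-n),-2], A's Python negative-index wraparound makes it return that negative index (<= -2), while B returns -1, the intended 'not found' answer for a search over real positions >= start. — e.g. on _rfind_sequence([1, 2, 3], [2, 3, 1], -2): A returns -2, B returns -1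
import Mathlib
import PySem

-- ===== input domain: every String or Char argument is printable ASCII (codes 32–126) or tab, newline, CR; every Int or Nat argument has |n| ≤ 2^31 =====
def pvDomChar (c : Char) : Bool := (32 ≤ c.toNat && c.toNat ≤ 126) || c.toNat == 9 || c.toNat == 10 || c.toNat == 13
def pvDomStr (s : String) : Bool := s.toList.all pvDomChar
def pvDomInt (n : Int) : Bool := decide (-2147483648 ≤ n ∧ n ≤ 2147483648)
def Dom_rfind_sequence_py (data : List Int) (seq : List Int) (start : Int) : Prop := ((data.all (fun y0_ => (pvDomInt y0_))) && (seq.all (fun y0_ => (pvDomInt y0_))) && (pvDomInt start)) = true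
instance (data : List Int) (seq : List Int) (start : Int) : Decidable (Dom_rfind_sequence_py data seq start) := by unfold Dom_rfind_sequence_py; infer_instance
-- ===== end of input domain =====

-- B masks the data once and searches with a single rfind-style scan over real (non-negative)
-- positions instead of A's index-by-index double loop; equivalence is about the return value only.

-- ===== PORT A =====
-- inner 'for j in range(seq_len)' loop of A; none = IndexError (data[i+j] out of range)
def pvMatchA (data : List Int) (i : Int) : List Int → Int → Option Bool
  | [], _ => some true
  | s :: rest, j =>
    match PySem.List.pyGet? data (i + j) with
    | none => none
    | some v => if PySem.Int.band v 255 ≠ s then some false else pvMatchA data i rest (j + 1)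

-- outer 'while i >= start' loop of A, fuel = number of iterations left
def pvLoopA (data seq : List Int) : Int → Nat → Option Int
  | _, 0 => some (-1)
  | i, k+1 =>
    match pvMatchA data i seq 0 with
    | none => none
    | some true => some i
    | some false => pvLoopA data seq (i - 1) k

def rfind_sequence_py (data : List Int) (seq : List Int) (start : Int) : Int :=
  let data_len : Int := data.length
  let seq_len : Int := seq.length
  if seq_len = 0 ∨ data_len < seq_len then -1
  else
    let i := data_len - seq_len
    if i < start then -1
    else (pvLoopA data seq i (i - start + 1).toNat).getD 0

-- ===== PORT B =====
-- bytes.rfind(needle, s): scan candidate positions s+k, s+k-1, …, s comparing slices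
def pvRfindGo (hay needle : List Int) (s : Nat) : Nat → Int
  | 0 => if (hay.drop s).take needle.length = needle then (s : Int) else -1
  | k+1 =>
    if (hay.drop (s+k+1)).take needle.length = needle then ((s+k+1 : Nat) : Int)
    else pvRfindGo hay needle s k

def rfind_sequence_py_alt (data : List Int) (seq : List Int) (start : Int) : Int :=
  let m := seq.length
  let n := data.length
  if m = 0 ∨ (n : Int) < (m : Int) then -1
  else if seq.any (fun x => !(decide (0 ≤ x) && decide (x ≤ 255))) then -1
  else
    let masked := data.map (fun x => PySem.Int.band x 255)
    let s : Nat := (max start 0).toNat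
    if n - m < s then -1 else pvRfindGo masked seq s (n - m - s)

-- ===== PRECONDITION & SPEC =====
-- spec-side predicate (independent of both ports): u is a start position of the masked seq in
-- the doubled masked data; position u corresponds to Python index u - len(data) (wraparound view)
def pvOcc (data seq : List Int) (u : Nat) : Prop :=
  (((data ++ data).map (fun x => PySem.Int.band x 255)).drop u).take seq.length = seq

-- Pre_ excludes exactly the inputs on which A raises IndexError: start < -len(data) while the
-- masked seq occurs at no position in [-len(data), len(data)-len(seq)], so the scan runs past -len(data).
def Pre_rfind_sequence_py (data : List Int) (seq : List Int) (start : Int) : Prop :=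
  ¬(0 < seq.length ∧ seq.length ≤ data.length ∧ start < -(data.length : Int) ∧
    ∀ u : Nat, u < 2 * data.length → ¬ pvOcc data seq u)
instance (data : List Int) (seq : List Int) (start : Int) : Decidable (Pre_rfind_sequence_py data seq start) := by
  unfold Pre_rfind_sequence_py pvOcc; infer_instance

def pvWitness_rfind_sequence_py : List Int × List Int × Int := ([1, 2], [2], 0)

-- When start < 0 and the masked seq occurs nowhere at positions -1..n-m but occurs at some wrapped
-- position in [max(start,-n),-2], A's negative-index wraparound returns that negative index (≤ -2),
-- while B returns -1, the intended 'not found' answer for a search over real positions ≥ start.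
def D_rfind_sequence_py (data : List Int) (seq : List Int) (start : Int) : Prop :=
  seq.length ≤ data.length ∧
  (∀ u : Nat, u < 2 * data.length → data.length - 1 ≤ u → ¬ pvOcc data seq u) ∧
  (∃ u : Nat, u < data.length ∧ start + data.length ≤ (u : Int) ∧ (u : Int) ≤ (data.length : Int) - 2 ∧ pvOcc data seq u)
instance (data : List Int) (seq : List Int) (start : Int) : Decidable (D_rfind_sequence_py data seq start) := by
  unfold D_rfind_sequence_py pvOcc; infer_instance

def Spec_rfind_sequence_py (data : List Int) (seq : List Int) (start : Int) (out : Int) : Prop :=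
  ¬ D_rfind_sequence_py data seq start → out = rfind_sequence_py_alt data seq start
instance (data : List Int) (seq : List Int) (start : Int) (out : Int) : Decidable (Spec_rfind_sequence_py data seq start out) := by
  unfold Spec_rfind_sequence_py; infer_instance

def pvDiffWitness_rfind_sequence_py : List Int × List Int × Int := ([1, 2, 3], [2, 3, 1], -2)
def pvDiffWitnessOut_rfind_sequence_py : Int × Int := (-2, -1)

-- ===== CLAIM (what is proved, stated in full; the proofs are below) =====
def Claim_unchanged_rfind_sequence_py : Prop := ∀ (data : List Int) (seq : List Int) (start : Int), Dom_rfind_sequence_py data seq start → Pre_rfind_sequence_py data seq start → Spec_rfind_sequence_py data seq start (rfind_sequence_py data seq start)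
def Claim_changed_rfind_sequence_py : Prop := Dom_rfind_sequence_py (pvDiffWitness_rfind_sequence_py.1) (pvDiffWitness_rfind_sequence_py.2.1) (pvDiffWitness_rfind_sequence_py.2.2) ∧ Pre_rfind_sequence_py (pvDiffWitness_rfind_sequence_py.1) (pvDiffWitness_rfind_sequence_py.2.1) (pvDiffWitness_rfind_sequence_py.2.2) ∧ D_rfind_sequence_py (pvDiffWitness_rfind_sequence_py.1) (pvDiffWitness_rfind_sequence_py.2.1) (pvDiffWitness_rfind_sequence_py.2.2) ∧ rfind_sequence_py (pvDiffWitness_rfind_sequence_py.1) (pvDiffWitness_rfind_sequence_py.2.1) (pvDiffWitness_rfind_sequence_py.2.2) = pvDiffWitnessOut_rfind_sequence_py.1 ∧ rfind_sequence_py_alt (pvDiffWitness_rfind_sequence_py.1) (pvDiffWitness_rfind_sequence_py.2.1) (pvDiffWitness_rfind_sequence_py.2.2) = pvDiffWitnessOut_rfind_sequence_py.2 ∧ pvDiffWitnessOut_rfind_sequence_py.1 ≠ pvDiffWitnessOut_rfind_sequence_py.2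
def Claim_exact_rfind_sequence_py : Prop := ∀ (data : List Int) (seq : List Int) (start : Int), Dom_rfind_sequence_py data seq start → Pre_rfind_sequence_py data seq start → D_rfind_sequence_py data seq start → rfind_sequence_py data seq start ≠ rfind_sequence_py_alt data seq start

-- ===== LEMMAS AND PROOFS =====

-- proof-side per-index view of an occurrence (Python negative-index semantics)
def pvByteAt? (data : List Int) (k : Int) : Option Int :=
  (PySem.List.pyGet? data k).map (fun v => PySem.Int.band v 255)
def pvOccursAt (data seq : List Int) (i : Int) : Bool :=
  (List.range seq.length).all (fun t => decide (pvByteAt? data (i + (t:Int)) = some (seq.getD t 0)))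


theorem pv_band255_bounds (x : Int) : 0 ≤ PySem.Int.band x 255 ∧ PySem.Int.band x 255 ≤ 255 := by
  unfold PySem.Int.band
  split_ifs with h1 h2 h2
  · constructor
    · positivity
    · have := Nat.and_le_right (n := x.toNat) (m := (255:Int).toNat)
      omega
  · omega
  · have : (255:Int).toNat - ((255:Int).toNat &&& (-x - 1).toNat) ≤ 255 := by omega
    omega
  · omega

theorem pvMatchA_eq (data : List Int) : ∀ (rest : List Int) (i j : Int),
    -(data.length : Int) ≤ i + j → i + j + rest.length ≤ data.length →
    pvMatchA data i rest j =
      some ((List.range rest.length).all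
        (fun t => decide (pvByteAt? data (i + j + (t:Int)) = some (rest.getD t 0)))) := by
  intro rest
  induction rest with
  | nil => intro i j _ _; simp [pvMatchA]
  | cons s rest ih =>
    intro i j hlo hhi
    obtain ⟨v, hv⟩ : ∃ v, PySem.List.pyGet? data (i + j) = some v := by
      rcases h : PySem.List.pyGet? data (i + j) with _ | v
      · rw [PySem.List.pyGet?_eq_none_iff] at h
        exfalso; apply h
        constructor
        · exact hlo
        · simp only [List.length_cons] at hhi; push_cast at hhi ⊢; omega
      · exact ⟨v, rfl⟩
    rw [pvMatchA, hv]
    by_cases hb : PySem.Int.band v 255 = s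
    · simp only [hb, ne_eq, not_true_eq_false, if_false]
      rw [ih i (j+1) (by omega) (by simp only [List.length_cons] at hhi; push_cast at hhi ⊢; omega)]
      congr 1
      simp only [List.length_cons]
      rw [List.range_succ_eq_map, List.all_cons, List.all_map]
      have hhead : decide (pvByteAt? data (i + j + ((0:Nat):Int)) = some ((s :: rest).getD 0 0)) = true := by
        simp [pvByteAt?, hv, hb]
      rw [hhead, Bool.true_and]
      apply List.all_congr rfl
      intro t
      simp only [Function.comp_apply, List.getD_cons_succ, Nat.succ_eq_add_one]
      have harg : i + j + (((t + 1 : Nat)) : Int) = i + (j + 1) + (t : Int) := by push_cast; ring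
      rw [harg]
    · simp only [hb, ne_eq, not_false_eq_true, if_true]
      congr 1
      simp only [List.length_cons]
      rw [List.range_succ_eq_map, List.all_cons]
      have hhead : decide (pvByteAt? data (i + j + ((0:Nat):Int)) = some ((s :: rest).getD 0 0)) = false := by
        simp [pvByteAt?, hv, hb]
      rw [hhead, Bool.false_and]

theorem pvMatchA_occ (data seq : List Int) (i : Int)
    (h1 : -(data.length : Int) ≤ i) (h2 : i + seq.length ≤ data.length) :
    pvMatchA data i seq 0 = some (pvOccursAt data seq i) := by
  rw [pvMatchA_eq data seq i 0 (by omega) (by omega)]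
  congr 1
  unfold pvOccursAt
  apply List.all_congr rfl
  intro t
  rw [add_zero]

theorem pv_nonbyte_no_occ (data seq : List Int)
    (h : seq.any (fun x => !(decide (0 ≤ x) && decide (x ≤ 255))) = true) (i : Int) :
    pvOccursAt data seq i = false := by
  rw [List.any_eq_true] at h
  obtain ⟨x, hx, hpx⟩ := h
  obtain ⟨t, ht, hxt⟩ := List.mem_iff_getElem.mp hx
  unfold pvOccursAt
  rw [List.all_eq_false]
  refine ⟨t, List.mem_range.mpr ht, ?_⟩
  simp only [Bool.not_eq_true, decide_eq_false_iff_not]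
  intro hc
  have hget : seq.getD t 0 = x := by rw [List.getD_eq_getElem seq 0 ht, hxt]
  rw [hget] at hc
  rcases hb : pvByteAt? data (i + (t:Int)) with _ | b
  · rw [hb] at hc; exact (Option.some_ne_none x hc.symm)
  · rw [hb] at hc
    have hbx : b = x := Option.some.inj hc
    obtain ⟨v, _, hv2⟩ := Option.map_eq_some_iff.mp hb
    have := pv_band255_bounds v
    simp only [Bool.not_eq_true', Bool.and_eq_false_iff, decide_eq_false_iff_not] at hpx
    rcases hpx with h' | h' <;> omega

theorem pvLoopA_found (data seq : List Int) : ∀ (f : Nat) (i p : Int),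
    i ≤ (data.length : Int) - seq.length → p ≤ i → i - f < p → -(data.length : Int) ≤ p →
    pvOccursAt data seq p = true →
    (∀ q : Int, p < q → q ≤ i → pvOccursAt data seq q = false) →
    pvLoopA data seq i f = some p := by
  intro f
  induction f with
  | zero => intro i p _ h2 h3 _ _ _; omega
  | succ f ih =>
    intro i p h1 h2 h3 h4 h5 h6
    rw [pvLoopA, pvMatchA_occ data seq i (by omega) (by omega)]
    by_cases hip : p = i
    · subst hip; rw [h5]
    · rw [h6 i (by omega) (by omega)]
      exact ih (i-1) p (by omega) (by omega) (by omega) h4 h5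
        (fun q hq1 hq2 => h6 q hq1 (by omega))

theorem pvLoopA_none (data seq : List Int) : ∀ (f : Nat) (i : Int),
    i ≤ (data.length : Int) - seq.length → -(data.length : Int) ≤ i - f + 1 →
    (∀ q : Int, i - f < q → q ≤ i → pvOccursAt data seq q = false) →
    pvLoopA data seq i f = some (-1) := by
  intro f
  induction f with
  | zero => intro i _ _ _; rfl
  | succ f ih =>
    intro i h1 h2 h3
    rw [pvLoopA, pvMatchA_occ data seq i (by push_cast at h2 ⊢; omega) (by omega)]
    rw [h3 i (by push_cast; omega) (by omega)]
    exact ih (i-1) (by omega) (by push_cast at h2 ⊢; omega)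
      (fun q hq1 hq2 => h3 q (by push_cast at hq1 ⊢; omega) (by omega))

theorem pvRfindGo_found (hay needle : List Int) : ∀ (k s p : Nat),
    s ≤ p → p ≤ s + k → (hay.drop p).take needle.length = needle →
    (∀ q : Nat, p < q → q ≤ s + k → (hay.drop q).take needle.length ≠ needle) →
    pvRfindGo hay needle s k = (p : Int) := by
  intro k
  induction k with
  | zero =>
    intro s p h1 h2 h3 _
    have : p = s := by omega
    subst this
    rw [pvRfindGo, if_pos h3]
  | succ k ih =>
    intro s p h1 h2 h3 h4
    rw [pvRfindGo]
    by_cases htop : p = s + k + 1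
    · subst htop; rw [if_pos h3]
    · rw [if_neg (h4 (s+k+1) (by omega) (by omega))]
      exact ih s p h1 (by omega) h3 (fun q hq1 hq2 => h4 q hq1 (by omega))

theorem pvRfindGo_none (hay needle : List Int) : ∀ (k s : Nat),
    (∀ q : Nat, s ≤ q → q ≤ s + k → (hay.drop q).take needle.length ≠ needle) →
    pvRfindGo hay needle s k = -1 := by
  intro k
  induction k with
  | zero => intro s h; rw [pvRfindGo, if_neg (h s (le_refl s) (by omega))]
  | succ k ih =>
    intro s h
    rw [pvRfindGo, if_neg (h (s+k+1) (by omega) (by omega))]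
    exact ih s (fun q hq1 hq2 => h q hq1 (by omega))

theorem pv_slice_occ (data seq : List Int) (p : Nat) (hp : p + seq.length ≤ data.length) :
    ((((data.map (fun x => PySem.Int.band x 255)).drop p).take seq.length = seq)) ↔
      pvOccursAt data seq (p : Int) = true := by
  set masked := data.map (fun x => PySem.Int.band x 255) with hm
  have hlen : masked.length = data.length := by simp [hm]
  have hlslice : (((masked.drop p).take seq.length)).length = seq.length := by
    simp [hlen]; omega
  have hbyte : ∀ t : Nat, t < seq.length →
      pvByteAt? data ((p:Int) + (t:Int)) = some (((masked.drop p).take seq.length).getD t 0) := by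
    intro t ht
    have hb1 : (((masked.drop p).take seq.length)).getD t 0
        = masked[p+t]'(by omega) := by
      rw [List.getD_eq_getElem _ 0 (by rw [hlslice]; exact ht), List.getElem_take, List.getElem_drop]
    rw [hb1]
    unfold pvByteAt?
    have harg : (p:Int) + (t:Int) = ((p+t : Nat) : Int) := by push_cast; ring
    rw [harg, PySem.List.pyGet?_natCast, List.getElem?_eq_getElem (by omega)]
    simp only [Option.map_some]
    congr 1
    simp [hm]
  constructor
  · intro h
    unfold pvOccursAt
    rw [List.all_eq_true]
    intro t htm
    have ht := List.mem_range.mp htm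
    rw [decide_eq_true_iff, hbyte t ht, h]
  · intro h
    apply List.ext_getElem hlslice
    intro t ht1 ht2
    unfold pvOccursAt at h
    rw [List.all_eq_true] at h
    have h2 := h t (List.mem_range.mpr ht2)
    rw [decide_eq_true_iff, hbyte t ht2] at h2
    have h3 := Option.some.inj h2
    rw [← List.getD_eq_getElem _ 0 ht1, ← List.getD_eq_getElem seq 0 ht2, h3]

theorem pvOcc_big (data seq : List Int) (u : Nat) (hm : 0 < seq.length)
    (h : 2 * data.length < u + seq.length) : ¬ pvOcc data seq u := by
  intro hc
  have := congrArg List.length hc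
  simp [pvOcc, List.length_take, List.length_drop] at this
  omega

theorem pvOcc_iff (data seq : List Int) (u : Nat) (hmn : seq.length ≤ data.length)
    (hu : u + seq.length ≤ 2 * data.length) :
    pvOcc data seq u ↔ pvOccursAt data seq ((u : Int) - (data.length : Int)) = true := by
  unfold pvOcc
  set bb := (data ++ data).map (fun x => PySem.Int.band x 255) with hbb
  have hlen : bb.length = 2 * data.length := by simp [hbb]; omega
  have hlslice : ((bb.drop u).take seq.length).length = seq.length := by simp [hlen]; omega
  have hbyte : ∀ t : Nat, t < seq.length →
      pvByteAt? data ((u : Int) - (data.length : Int) + (t : Int))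
        = some (((bb.drop u).take seq.length).getD t 0) := by
    intro t ht
    have hb1 : ((bb.drop u).take seq.length).getD t 0 = bb[u + t]'(by omega) := by
      rw [List.getD_eq_getElem _ 0 (by rw [hlslice]; exact ht), List.getElem_take, List.getElem_drop]
    have hb2 : bb[u + t]'(by omega)
        = PySem.Int.band ((data ++ data)[u + t]'(by simp; omega)) 255 := by
      simp only [hbb, List.getElem_map]
    rw [hb1, hb2]
    unfold pvByteAt?
    rcases lt_or_ge (u + t) data.length with hcase | hcase
    · have harg : (u : Int) - (data.length : Int) + (t : Int)
          = -(((data.length - (u + t) : Nat) : Int)) := by push_cast; omega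
      rw [harg, PySem.List.pyGet?_neg_natCast _ _ (by exact_mod_cast (by omega : (0:Int) < ((data.length - (u + t) : Nat) : Int))) (by omega)]
      rw [show data.length - (data.length - (u + t)) = u + t by omega]
      rw [List.getElem?_eq_getElem (by omega)]
      simp only [Option.map_some]
      congr 2
      rw [List.getElem_append_left hcase]
    · have harg : (u : Int) - (data.length : Int) + (t : Int)
          = ((u + t - data.length : Nat) : Int) := by push_cast; omega
      rw [harg, PySem.List.pyGet?_natCast, List.getElem?_eq_getElem (by omega)]
      simp only [Option.map_some]
      congr 2
      rw [List.getElem_append_right (by omega)]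
  constructor
  · intro h
    unfold pvOccursAt
    rw [List.all_eq_true]
    intro t htm
    have ht := List.mem_range.mp htm
    rw [decide_eq_true_iff, hbyte t ht, h]
  · intro h
    apply List.ext_getElem hlslice
    intro t ht1 ht2
    unfold pvOccursAt at h
    rw [List.all_eq_true] at h
    have h2 := h t (List.mem_range.mpr ht2)
    rw [decide_eq_true_iff, hbyte t ht2] at h2
    have h3 := Option.some.inj h2
    rw [← List.getD_eq_getElem _ 0 ht1, ← List.getD_eq_getElem seq 0 ht2, h3]

-- no occurrence at Python positions [-n, n-m] gives Pre_'s / D_'s Nat-indexed forms and back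
theorem pv_all_to_new (data seq : List Int) (hm : 0 < seq.length) (hmn : seq.length ≤ data.length)
    (h : ∀ i : Int, -(data.length : Int) ≤ i → i ≤ (data.length : Int) - seq.length →
      pvOccursAt data seq i = false) :
    ∀ u : Nat, u < 2 * data.length → ¬ pvOcc data seq u := by
  intro u hu
  rcases lt_or_ge (2 * data.length) (u + seq.length) with hc | hc
  · exact pvOcc_big data seq u hm hc
  · intro hc2
    rw [pvOcc_iff data seq u hmn (by omega)] at hc2
    rw [h ((u : Int) - data.length) (by omega) (by omega)] at hc2
    exact Bool.false_ne_true hc2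

theorem pv_high_to_new (data seq : List Int) (hm : 0 < seq.length) (hmn : seq.length ≤ data.length)
    (h : ∀ i : Int, -1 ≤ i → i ≤ (data.length : Int) - seq.length → pvOccursAt data seq i = false) :
    ∀ u : Nat, u < 2 * data.length → data.length - 1 ≤ u → ¬ pvOcc data seq u := by
  intro u hu hu2
  rcases lt_or_ge (2 * data.length) (u + seq.length) with hc | hc
  · exact pvOcc_big data seq u hm hc
  · intro hc2
    rw [pvOcc_iff data seq u hmn (by omega)] at hc2
    rw [h ((u : Int) - data.length) (by omega) (by omega)] at hc2
    exact Bool.false_ne_true hc2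

theorem pv_new_to_occ_false (data seq : List Int) (hm : 0 < seq.length) (hmn : seq.length ≤ data.length)
    (h4 : ∀ u : Nat, u < 2 * data.length → data.length - 1 ≤ u → ¬ pvOcc data seq u) :
    ∀ i : Int, -1 ≤ i → i ≤ (data.length : Int) - seq.length → pvOccursAt data seq i = false := by
  intro i h1 h2
  rw [← Bool.not_eq_true]
  intro hc
  apply h4 (i + (data.length : Int)).toNat (by omega) (by omega)
  rw [pvOcc_iff data seq _ hmn (by omega)]
  rw [show (((i + (data.length : Int)).toNat : Int) - (data.length : Int)) = i by omega]
  exact hc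

theorem pv_ex_intro (data seq : List Int) (start : Int) (hmn : seq.length ≤ data.length)
    (i : Int) (hi1 : max start (-(data.length : Int)) ≤ i) (hi2 : i ≤ -2)
    (hocc : pvOccursAt data seq i = true) :
    ∃ u : Nat, u < data.length ∧ start + data.length ≤ (u : Int) ∧
      (u : Int) ≤ (data.length : Int) - 2 ∧ pvOcc data seq u := by
  refine ⟨(i + (data.length : Int)).toNat, by omega, by omega, by omega, ?_⟩
  rw [pvOcc_iff data seq _ hmn (by omega)]
  rw [show (((i + (data.length : Int)).toNat : Int) - (data.length : Int)) = i by omega]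
  exact hocc

theorem pv_main (data seq : List Int) (start : Int)
    (hpre : Pre_rfind_sequence_py data seq start)
    (hnd : ¬ D_rfind_sequence_py data seq start) :
    rfind_sequence_py data seq start = rfind_sequence_py_alt data seq start := by
  unfold rfind_sequence_py rfind_sequence_py_alt
  dsimp only
  by_cases h0 : (seq.length : Int) = 0 ∨ (data.length : Int) < (seq.length : Int)
  · have h0' : seq.length = 0 ∨ (data.length : Int) < (seq.length : Int) := by
      rcases h0 with h | h
      · left; exact_mod_cast h
      · right; exact h
    rw [if_pos h0, if_pos h0']
  · have h0' : ¬(seq.length = 0 ∨ (data.length : Int) < (seq.length : Int)) := by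
      rcases not_or.mp h0 with ⟨hh1, hh2⟩
      push_neg
      refine ⟨by exact_mod_cast hh1, by omega⟩
    rw [if_neg h0, if_neg h0']
    obtain ⟨h1, h2⟩ := not_or.mp h0
    have hm : 0 < seq.length := by
      rcases Nat.eq_zero_or_pos seq.length with h | h
      · exact absurd (by exact_mod_cast congrArg (Nat.cast : Nat → Int) h) h1
      · exact h
    have hmn : seq.length ≤ data.length := by exact_mod_cast not_lt.mp h2
    have hi0nn : (0:Int) ≤ (data.length : Int) - (seq.length : Int) := by
      have := hmn; omega
    by_cases hst : (data.length : Int) - (seq.length : Int) < start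
    · rw [if_pos hst]
      by_cases hb : seq.any (fun x => !(decide (0 ≤ x) && decide (x ≤ 255))) = true
      · rw [if_pos hb]
      · rw [if_neg hb, if_pos (by omega)]
    · rw [if_neg hst]
      -- fuel for A's while loop
      set f : Nat := (((data.length : Int) - (seq.length : Int)) - start + 1).toNat with hf
      have hfval : (f : Int) = (data.length : Int) - (seq.length : Int) - start + 1 := by omega
      by_cases hb : seq.any (fun x => !(decide (0 ≤ x) && decide (x ≤ 255))) = true
      · -- a needle value can never be a masked byte: no occurrence anywhere
        rw [if_pos hb]
        have hno := pv_nonbyte_no_occ data seq hb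
        -- Pre rules out the raising case, so start ≥ -n
        have hstart : -(data.length : Int) ≤ start := by
          by_contra hc
          exact hpre ⟨hm, hmn, by omega, pv_all_to_new data seq hm hmn (fun i _ _ => hno i)⟩
        rw [pvLoopA_none data seq f _ (by omega) (by omega) (fun q _ _ => hno q)]
        rfl
      · rw [if_neg hb]
        set s : Nat := (max start 0).toNat with hs
        have hsval : (s : Int) = max start 0 := by omega
        have hsle : s ≤ data.length - seq.length := by omega
        rw [if_neg (by omega)]
        by_cases hex : ∃ t : Nat, t ≤ (data.length - seq.length) - s ∧
            (((data.map (fun x => PySem.Int.band x 255)).drop ((data.length - seq.length) - t)).take seq.length = seq)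
        · -- a match exists at a non-negative position ≥ s: both return the greatest one
          classical
          obtain ⟨t1, ht1b, ht1m⟩ := hex
          have hexQ : ∃ t : Nat, t ≤ (data.length - seq.length) - s ∧
              (((data.map (fun x => PySem.Int.band x 255)).drop ((data.length - seq.length) - t)).take seq.length = seq) := ⟨t1, ht1b, ht1m⟩
          set t0 := Nat.find hexQ with ht0
          obtain ⟨ht0b, ht0m⟩ := Nat.find_spec hexQ
          set p : Nat := (data.length - seq.length) - t0 with hpdef
          have hps : s ≤ p := by omega
          have hnomatch_above : ∀ q : Nat, p < q → q ≤ data.length - seq.length →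
              (((data.map (fun x => PySem.Int.band x 255)).drop q).take seq.length ≠ seq) := by
            intro q hq1 hq2 hq3
            have : (data.length - seq.length) - q < t0 := by omega
            exact Nat.find_min hexQ this ⟨by omega, by
              have : (data.length - seq.length) - ((data.length - seq.length) - q) = q := by omega
              rw [this]; exact hq3⟩
          rw [pvRfindGo_found _ _ ((data.length - seq.length) - s) s p hps (by omega) (by
              have : (data.length - seq.length) - t0 = p := rfl
              rw [← this]; exact ht0m)
            (fun q hq1 hq2 => hnomatch_above q hq1 (by omega))]
          have hoccp : pvOccursAt data seq (p : Int) = true :=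
            (pv_slice_occ data seq p (by omega)).mp ht0m
          rw [pvLoopA_found data seq f _ (p : Int) (by omega) (by omega) (by omega) (by omega) hoccp
            (by
              intro q hq1 hq2
              have hq0 : 0 ≤ q := by omega
              have hqn : q = ((q.toNat : Nat) : Int) := by omega
              rw [hqn]
              rw [← Bool.not_eq_true]
              intro hc
              exact hnomatch_above q.toNat (by omega) (by omega)
                ((pv_slice_occ data seq q.toNat (by omega)).mpr hc))]
          rfl
        · -- no match at any non-negative position ≥ s
          push_neg at hex
          have hno_nonneg : ∀ q : Int, (s:Int) ≤ q → q ≤ (data.length : Int) - (seq.length : Int) →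
              pvOccursAt data seq q = false := by
            intro q hq1 hq2
            have hq0 : 0 ≤ q := by omega
            have hqn : q = ((q.toNat : Nat) : Int) := by omega
            rw [hqn, ← Bool.not_eq_true]
            intro hc
            have hsl := (pv_slice_occ data seq q.toNat (by omega)).mpr hc
            exact hex ((data.length - seq.length) - q.toNat) (by omega)
              (by
                have : (data.length - seq.length) - ((data.length - seq.length) - q.toNat) = q.toNat := by omega
                rw [this]; exact hsl)
          rw [pvRfindGo_none _ _ _ s (by
            intro q hq1 hq2 hq3
            have hocc := (pv_slice_occ data seq q (by omega)).mp hq3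
            rw [hno_nonneg q (by omega) (by omega)] at hocc
            exact Bool.false_ne_true hocc)]
          by_cases hneg : 0 ≤ start
          · rw [pvLoopA_none data seq f _ (by omega) (by omega)
              (fun q hq1 hq2 => hno_nonneg q (by omega) (by omega))]
            rfl
          · push_neg at hneg
            have hs0 : (s : Int) = 0 := by omega
            by_cases hm1 : pvOccursAt data seq (-1) = true
            · -- A finds the wrapped occurrence at -1 and returns -1 too
              rw [pvLoopA_found data seq f _ (-1) (by omega) (by omega) (by omega) (by omega) hm1
                (fun q hq1 hq2 => hno_nonneg q (by omega) (by omega))]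
              rfl
            · have hm1f : pvOccursAt data seq (-1) = false := by
                rw [← Bool.not_eq_true]; exact hm1
              by_cases hnegex : ∃ i : Int, max start (-(data.length : Int)) ≤ i ∧ i ≤ -2 ∧ pvOccursAt data seq i = true
              · exfalso
                apply hnd
                obtain ⟨i, hi1, hi2, hi3⟩ := hnegex
                refine ⟨hmn, ?_, pv_ex_intro data seq start hmn i hi1 hi2 hi3⟩
                apply pv_high_to_new data seq hm hmn
                intro q hq1 hq2
                rcases eq_or_lt_of_le hq1 with he | hl
                · rw [← he]; exact hm1f
                · exact hno_nonneg q (by omega) (by omega)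
              · push_neg at hnegex
                have hno_neg : ∀ q : Int, max start (-(data.length : Int)) ≤ q → q ≤ -2 →
                    pvOccursAt data seq q = false := by
                  intro q hq1 hq2
                  rw [← Bool.not_eq_true]
                  exact hnegex q hq1 hq2
                by_cases hsn : -(data.length : Int) ≤ start
                · rw [pvLoopA_none data seq f _ (by omega) (by omega) (by
                    intro q hq1 hq2
                    rcases lt_or_ge q 0 with hq | hq
                    · rcases eq_or_lt_of_le (show q ≤ -1 by omega) with he | hl
                      · rw [he]; exact hm1f
                      · exact hno_neg q (by omega) (by omega)
                    · exact hno_nonneg q (by omega) (by omega))]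
                  rfl
                · exfalso
                  apply hpre
                  refine ⟨hm, hmn, by omega, pv_all_to_new data seq hm hmn ?_⟩
                  intro q hq1 hq2
                  rcases lt_or_ge q 0 with hqs | hqs
                  · rcases eq_or_lt_of_le (show q ≤ -1 by omega) with he | hl
                    · rw [he]; exact hm1f
                    · exact hno_neg q (by push_neg at hsn; omega) (by omega)
                  · exact hno_nonneg q (by omega) (by omega)

theorem pv_tight (data seq : List Int) (start : Int)
    (hd : D_rfind_sequence_py data seq start) :
    rfind_sequence_py data seq start ≠ rfind_sequence_py_alt data seq start := by
  classical
  obtain ⟨hmn, h4n, h5n⟩ := hd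
  obtain ⟨uw, huw, hub1, hub2, hocw⟩ := h5n
  have hm : 0 < seq.length := by
    rcases Nat.eq_zero_or_pos seq.length with h0 | h0
    · exfalso
      apply h4n (data.length - 1) (by omega) (by omega)
      have hseq : seq = [] := List.eq_nil_of_length_eq_zero h0
      simp [pvOcc, hseq, h0]
    · exact h0
  have h4 : ∀ i : Int, -1 ≤ i → i ≤ (data.length : Int) - seq.length →
      pvOccursAt data seq i = false := pv_new_to_occ_false data seq hm hmn h4n
  have hkw3 : pvOccursAt data seq ((uw : Int) - data.length) = true := by
    rw [← pvOcc_iff data seq uw hmn (by omega)]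
    exact hocw
  have hnobyte : ¬ seq.any (fun x => !(decide (0 ≤ x) && decide (x ≤ 255))) = true := by
    intro hb
    rw [pv_nonbyte_no_occ data seq hb] at hkw3
    exact Bool.false_ne_true hkw3
  have hP : ∃ k : Nat, pvOccursAt data seq (-2 - (k : Int)) = true := by
    refine ⟨(data.length - 2 - uw : Nat), ?_⟩
    rw [show (-2 - (((data.length - 2 - uw : Nat)) : Int)) = (uw : Int) - data.length by omega]
    exact hkw3
  set k0 := Nat.find hP with hk0
  have hocc0 : pvOccursAt data seq (-2 - (k0 : Int)) = true := Nat.find_spec hP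
  have hk0b : k0 ≤ data.length - 2 - uw := Nat.find_min' hP (by
    rw [show (-2 - (((data.length - 2 - uw : Nat)) : Int)) = (uw : Int) - data.length by omega]
    exact hkw3)
  set p : Int := -2 - (k0 : Int) with hp
  have hpge : start ≤ p ∧ -(data.length : Int) ≤ p := by omega
  have hple : p ≤ -2 := by omega
  have habove : ∀ q : Int, p < q → q ≤ (data.length : Int) - (seq.length : Int) →
      pvOccursAt data seq q = false := by
    intro q hq1 hq2
    rcases lt_or_ge q (-1) with hqs | hqs
    · rw [← Bool.not_eq_true]
      intro hc
      have := Nat.find_min hP (m := (-2 - q).toNat) (by omega)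
      rw [show (-2 - ((-2 - q).toNat : Int)) = q by omega] at this
      exact this hc
    · exact h4 q hqs hq2
  have hA : rfind_sequence_py data seq start = p := by
    unfold rfind_sequence_py
    dsimp only
    rw [if_neg (by push_neg; constructor <;> [exact_mod_cast (by omega : ¬ (seq.length:Int) = 0); omega])]
    rw [if_neg (by omega)]
    rw [pvLoopA_found data seq _ _ p (by omega) (by omega) (by omega) (by omega) hocc0 habove]
    rfl
  have hB : rfind_sequence_py_alt data seq start = -1 := by
    unfold rfind_sequence_py_alt
    dsimp only
    rw [if_neg (by push_neg; constructor <;> omega)]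
    rw [if_neg hnobyte]
    rw [if_neg (by omega)]
    rw [pvRfindGo_none _ _ _ _ (by
      intro q hq1 hq2 hq3
      have hocc := (pv_slice_occ data seq q (by omega)).mp hq3
      rw [habove q (by omega) (by omega)] at hocc
      exact Bool.false_ne_true hocc)]
  rw [hA, hB]
  omega

-- ===== VERDICT (by name: the statement is the Claim_ definition above) =====
theorem rfind_sequence_py_spec : Claim_unchanged_rfind_sequence_py := by
  intro data seq start _ hpre hnd
  exact pv_main data seq start hpre hnd

theorem rfind_sequence_py_changed : Claim_changed_rfind_sequence_py := by
  unfold Claim_changed_rfind_sequence_py; decide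

theorem rfind_sequence_py_tight : Claim_exact_rfind_sequence_py := by
  intro data seq start _ _ hd
  exact pv_tight data seq start hd
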